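-- pv_equiv track=rewrite | github.com/ahdavies6/NLP_QA | src/parse.py | put_in_order
-- ===== SOURCE A (Python) =====
-- def put_in_order(dependents, sentence):
--     """
--     :param dependents: (unordered) set of dependents in the sentence
--     :param sentence: (ordered) list of tuples of word tokens [(word1, tag1), (word2, tag2), ...]
--     :return: the dependents, in the order they appear in the sentence
--     """
--     potential_order = []
--     for word, tag in sentence:
--         if word in dependents:
--             potential_order.append((word, tag))
--             if len(potential_order) == len(dependents):
--                 return potential_order
--         else:
--             potential_order = []
-- ===== SOURCE B (Python) =====
-- from itertools import groupby
--
-- def put_in_order(dependents, sentence):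
--     """Segment-then-select: group the sentence into maximal consecutive runs
--     keyed on membership in dependents, then return the first k tokens of the
--     first in-dependents run of length >= k = len(dependents)."""
--     k = len(dependents)
--     for key, grp in groupby(sentence, key=lambda pair: pair[0] in dependents):
--         if key:
--             run = list(grp)
--             if len(run) >= k:
--                 return run[:k]
--     return None
-- ===== Notes on version B (the rewrite author's own statement) =====
-- stated objective: idiomatic
-- what changed: Replaces A's single pass with a resettable accumulator by a two-phase segment-then-select: groupby the sentence into maximal consecutive runs keyed on membership in dependents, then return the first k tokens of the first in-dependents run of length >= k.
import Mathlib
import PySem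

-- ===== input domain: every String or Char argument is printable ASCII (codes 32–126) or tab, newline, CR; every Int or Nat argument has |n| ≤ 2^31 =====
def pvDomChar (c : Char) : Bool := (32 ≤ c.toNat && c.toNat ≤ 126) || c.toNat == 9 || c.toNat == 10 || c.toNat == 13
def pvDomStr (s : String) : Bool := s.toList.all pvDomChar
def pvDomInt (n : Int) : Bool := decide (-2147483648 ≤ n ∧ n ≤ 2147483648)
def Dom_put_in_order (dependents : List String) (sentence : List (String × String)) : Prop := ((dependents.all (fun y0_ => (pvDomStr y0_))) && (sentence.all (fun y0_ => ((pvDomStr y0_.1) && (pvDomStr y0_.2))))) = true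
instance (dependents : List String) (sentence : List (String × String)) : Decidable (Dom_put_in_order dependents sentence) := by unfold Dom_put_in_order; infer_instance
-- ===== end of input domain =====

-- B replaces A's accumulate-and-reset single pass by a two-phase segment-then-select
-- (groupby into maximal membership runs, then pick the first long-enough run); objective: idiomatic.

-- ===== PORT A =====
-- the for-loop with the resettable accumulator `potential_order`
def pvGoA (deps : List String) (acc : List (String × String)) :
    List (String × String) → Option (List (String × String))
  | [] => none
  | p :: rest =>
    if deps.contains p.1 then
      let acc' := acc ++ [p]
      if acc'.length = deps.length then some acc' else pvGoA deps acc' rest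
    else pvGoA deps [] rest

def put_in_order (dependents : List String) (sentence : List (String × String)) :
    Option (List (String × String)) :=
  pvGoA dependents [] sentence

-- ===== PORT B =====
-- itertools.groupby(sentence, key = pair[0] in dependents), each group materialized
def pvSegs (deps : List String) : List (String × String) → List (Bool × List (String × String))
  | [] => []
  | p :: rest =>
    match pvSegs deps rest with
    | [] => [(deps.contains p.1, [p])]
    | (b, g) :: gs =>
      if deps.contains p.1 = b then (b, p :: g) :: gs
      else (deps.contains p.1, [p]) :: (b, g) :: gs

-- the selection loop: first in-dependents run of length ≥ k, truncated to k
def pvSelect (k : Nat) : List (Bool × List (String × String)) → Option (List (String × String))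
  | [] => none
  | (b, g) :: gs => if b = true ∧ k ≤ g.length then some (g.take k) else pvSelect k gs

def put_in_order_alt (dependents : List String) (sentence : List (String × String)) :
    Option (List (String × String)) :=
  pvSelect dependents.length (pvSegs dependents sentence)

-- ===== PRECONDITION & SPEC =====
def Spec_put_in_order (dependents : List String) (sentence : List (String × String)) (out : Option (List (String × String))) : Prop := out = put_in_order_alt dependents sentence
instance (dependents : List String) (sentence : List (String × String)) (out : Option (List (String × String))) : Decidable (Spec_put_in_order dependents sentence out) := by unfold Spec_put_in_order; infer_instance

-- ===== CLAIM (what is proved, stated in full; the proofs are below) =====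
def Claim_equal_put_in_order : Prop := ∀ (dependents : List String) (sentence : List (String × String)), Dom_put_in_order dependents sentence → Spec_put_in_order dependents sentence (put_in_order dependents sentence)

-- ===== LEMMAS AND PROOFS =====

-- prepend a pending (in-dependents) run `acc` onto the leading true group
def pvMerge (acc : List (String × String)) (gs : List (Bool × List (String × String))) :
    List (Bool × List (String × String)) :=
  if acc = [] then gs else
  match gs with
  | (true, g) :: rest => (true, acc ++ g) :: rest
  | _ => (true, acc) :: gs

theorem pvSelect_cons_false (k : Nat) (g : List (String × String))
    (gs : List (Bool × List (String × String))) :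
    pvSelect k ((false, g) :: gs) = pvSelect k gs := by
  simp [pvSelect]

theorem pvSelect_cons_true_short (k : Nat) (g : List (String × String))
    (gs : List (Bool × List (String × String))) (h : ¬ k ≤ g.length) :
    pvSelect k ((true, g) :: gs) = pvSelect k gs := by
  simp [pvSelect, h]

theorem pvSelect_cons_true_long (k : Nat) (g : List (String × String))
    (gs : List (Bool × List (String × String))) (h : k ≤ g.length) :
    pvSelect k ((true, g) :: gs) = some (g.take k) := by
  simp [pvSelect, h]

theorem pvMerge_true (deps : List String) (acc : List (String × String))
    (p : String × String) (rs : List (String × String))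
    (hc : p.1 ∈ deps) :
    pvMerge acc (pvSegs deps (p :: rs)) = pvMerge (acc ++ [p]) (pvSegs deps rs) := by
  simp only [pvSegs]
  cases h : pvSegs deps rs with
  | nil =>
    simp only [pvMerge]
    by_cases ha : acc = [] <;> simp [ha, hc]
  | cons hd tl =>
    obtain ⟨b, g⟩ := hd
    cases b with
    | true =>
      simp only [pvMerge]
      by_cases ha : acc = [] <;> simp [ha, hc]
    | false =>
      simp only [pvMerge]
      by_cases ha : acc = [] <;> simp [ha, hc]

theorem pvSegs_head (deps : List String) (p : String × String) (rs : List (String × String)) :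
    ∃ g gs, pvSegs deps (p :: rs) = (decide (p.1 ∈ deps), g) :: gs := by
  simp only [pvSegs]
  cases h : pvSegs deps rs with
  | nil => exact ⟨[p], [], by simp⟩
  | cons hd tl =>
    obtain ⟨b, g⟩ := hd
    by_cases hb : decide (p.1 ∈ deps) = b
    · exact ⟨p :: g, tl, by simp [hb.symm]⟩
    · exact ⟨[p], (b, g) :: tl, by simp [hb]⟩

theorem pvSelect_merge_short (k : Nat) (acc : List (String × String))
    (g : List (String × String)) (gs : List (Bool × List (String × String)))
    (hlt : acc.length < k) :
    pvSelect k (pvMerge acc ((false, g) :: gs)) = pvSelect k ((false, g) :: gs) := by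
  by_cases ha : acc = []
  · simp [pvMerge, ha]
  · rw [show pvMerge acc ((false, g) :: gs) = (true, acc) :: (false, g) :: gs from by
      simp [pvMerge, ha]]
    exact pvSelect_cons_true_short _ _ _ (by omega)

theorem pvSelect_merge_nil (k : Nat) (acc : List (String × String))
    (hlt : acc.length < k) :
    pvSelect k (pvMerge acc []) = none := by
  by_cases ha : acc = []
  · simp [pvMerge, ha, pvSelect]
  · rw [show pvMerge acc [] = [(true, acc)] from by simp [pvMerge, ha]]
    rw [pvSelect_cons_true_short _ _ _ (by omega)]
    simp [pvSelect]

theorem pvSelect_merge_full (k : Nat) (acc : List (String × String))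
    (gs : List (Bool × List (String × String)))
    (hne : acc ≠ []) (hlen : acc.length = k) :
    pvSelect k (pvMerge acc gs) = some acc := by
  cases gs with
  | nil =>
    rw [show pvMerge acc [] = [(true, acc)] from by simp [pvMerge, hne]]
    rw [pvSelect_cons_true_long _ _ _ (by omega)]
    rw [← hlen, List.take_length]
  | cons hd tl =>
    obtain ⟨b, g⟩ := hd
    cases b with
    | true =>
      rw [show pvMerge acc ((true, g) :: tl) = (true, acc ++ g) :: tl from by
        simp [pvMerge, hne]]
      rw [pvSelect_cons_true_long _ _ _ (by simp; omega)]
      rw [← hlen, List.take_left]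
    | false =>
      rw [show pvMerge acc ((false, g) :: tl) = (true, acc) :: (false, g) :: tl from by
        simp [pvMerge, hne]]
      rw [pvSelect_cons_true_long _ _ _ (by omega)]
      rw [← hlen, List.take_length]

theorem pvSegs_false_select (deps : List String) (k : Nat)
    (p : String × String) (rs : List (String × String))
    (hc : p.1 ∉ deps) :
    pvSelect k (pvSegs deps (p :: rs)) = pvSelect k (pvSegs deps rs) := by
  simp only [pvSegs]
  cases h : pvSegs deps rs with
  | nil => simp [hc, pvSelect]
  | cons hd tl =>
    obtain ⟨b, g⟩ := hd
    cases b with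
    | true => simp [hc, pvSelect_cons_false]
    | false => simp [hc, pvSelect_cons_false]

-- main invariant: the A-loop with pending run `acc` equals selection over `acc` merged
-- onto the remaining segments
theorem pvGoA_eq_select (deps : List String) (rest : List (String × String)) :
    ∀ acc : List (String × String), acc.length < deps.length →
      pvGoA deps acc rest = pvSelect deps.length (pvMerge acc (pvSegs deps rest)) := by
  induction rest with
  | nil =>
    intro acc hlt
    simp [pvGoA, pvSegs, pvSelect_merge_nil _ _ hlt]
  | cons p rs ih =>
    intro acc hlt
    by_cases hc : p.1 ∈ deps
    · rw [pvMerge_true deps acc p rs hc]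
      rw [show pvGoA deps acc (p :: rs) =
          (if (acc ++ [p]).length = deps.length then some (acc ++ [p])
           else pvGoA deps (acc ++ [p]) rs) from by
        simp [pvGoA, hc]]
      by_cases hfull : (acc ++ [p]).length = deps.length
      · rw [if_pos hfull, pvSelect_merge_full _ _ _ (by simp) hfull]
      · rw [if_neg hfull]
        have hlt' : (acc ++ [p]).length < deps.length := by
          simp only [List.length_append, List.length_cons, List.length_nil] at *
          omega
        exact ih (acc ++ [p]) hlt'
    · rw [show pvGoA deps acc (p :: rs) = pvGoA deps [] rs from by simp [pvGoA, hc]]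
      rw [ih [] (by simp only [List.length_nil]; omega)]
      obtain ⟨g, gs, hseg⟩ := pvSegs_head deps p rs
      rw [show (decide (p.1 ∈ deps)) = false from by simp [hc]] at hseg
      rw [hseg, pvSelect_merge_short _ _ _ _ hlt]
      rw [← hseg, pvSegs_false_select deps _ p rs hc]
      simp [pvMerge]

theorem pvSelect_segs_nil (k : Nat) (sent : List (String × String)) :
    pvSelect k (pvSegs [] sent) = none := by
  induction sent with
  | nil => simp [pvSegs, pvSelect]
  | cons p rs ih =>
    simp only [pvSegs]
    cases h : pvSegs ([] : List String) rs with
    | nil => simp [pvSelect]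
    | cons hd tl =>
      obtain ⟨b, g⟩ := hd
      rw [h] at ih
      cases b with
      | true => simp [pvSelect_cons_false, ih]
      | false =>
        rw [pvSelect_cons_false] at ih
        simp [pvSelect_cons_false, ih]

theorem pvGoA_nil (sent : List (String × String)) (acc : List (String × String)) :
    pvGoA [] acc sent = none := by
  induction sent generalizing acc with
  | nil => simp [pvGoA]
  | cons p rs ih => simp [pvGoA, ih]

-- ===== VERDICT (by name: the statement is the Claim_ definition above) =====
theorem put_in_order_spec : Claim_equal_put_in_order := by
  intro deps sent _hdom
  unfold Spec_put_in_order put_in_order put_in_order_alt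
  cases deps with
  | nil => rw [pvGoA_nil, pvSelect_segs_nil]
  | cons d ds =>
    rw [pvGoA_eq_select (d :: ds) sent [] (by simp)]
    simp [pvMerge]
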